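-- pv_equiv track=rewrite | github.com/georgegburns/Daily-Coding-Problem | Facebook - Reverse_String_Mainting_Delimiter - Hard.py | stringReverseDelimiter
-- ===== SOURCE A (Python) =====
-- import string
--
-- def stringReverseDelimiter(text : str):
--     """
--         Variables
--
--     """
--     # This is used to establish whether a character is a letter or a delimiter
--     LETTERS = string.ascii_letters
--     SEPERATE = []
--     TEMP = []
--
--     """
--
--         Main function
--
--     """
--
--     # Iterating through each character in the string and assigning to a list depending on whether it is a letter or a non-letter
--     for i in range(len(text)):
--         if not TEMP:
--             TEMP.append(text[i])
--         elif text[i] not in LETTERS and TEMP[-1] in LETTERS: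
--             SEPERATE.append("".join(TEMP))
--             TEMP = []
--             TEMP.append(text[i])
--         elif text[i] in LETTERS and TEMP[-1] not in LETTERS:
--             SEPERATE.append("".join(TEMP))
--             TEMP = []
--             TEMP.append(text[i])
--         else:
--             TEMP.append(text[i])
--     # These capture the last stored variables after the loop has ended
--     SEPERATE.append("".join(TEMP))
--
--     # Seperating out into two lists one of words and the other of delimiters
--     WORDS = [x for x in SEPERATE if x[0] in LETTERS]
--     DELIMITERS = [x for x in SEPERATE if x[0] not in LETTERS]
--
--     # Reversing the list of words
--     WORDS.reverse()
--
--     RESULTS = []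
--     # This is here to ensure that all the words / delimiters are captured in circumstances where they aren't even
--     COUNT = max(len(WORDS), len(DELIMITERS))
--
--     # This then creates a new list placing either a word/delimiter first depending on the original string
--     for i in range(COUNT):
--         try:
--             WORD = WORDS[i]
--         except:
--             WORD = ""
--         try:
--             DELIMITER = DELIMITERS[i]
--         except:
--             DELIMITER = ""
--         if text[0] in LETTERS:
--             RESULTS.append(WORD + DELIMITER)
--         else:
--             RESULTS.append(DELIMITER+WORD)
--
--     # Joining the new list to produce the result
--     RESULT = "".join(RESULTS).strip()
--     return RESULT
-- ===== SOURCE B (Python) =====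
-- import string
--
-- def stringReverseDelimiter(text: str):
--     # Split into maximal same-class runs with a two-pointer scan,
--     # reverse the letter runs, substitute them back in place, strip.
--     isl = lambda c: c in string.ascii_letters
--     runs = []
--     i, n = 0, len(text)
--     while i < n:
--         j = i + 1
--         while j < n and isl(text[j]) == isl(text[i]):
--             j += 1
--         runs.append(text[i:j])
--         i = j
--     words = [r for r in runs if isl(r[0])]
--     words.reverse()
--     it = iter(words)
--     return "".join(next(it) if isl(r[0]) else r for r in runs).strip()
-- ===== Notes on version B (the rewrite author's own statement) =====
-- stated objective: idiomatic
-- what changed: B tokenizes the string into maximal letter/non-letter runs with a two-pointer scan, reverses the list of letter runs, and rebuilds the output by substituting each letter run with the next reversed word while copying delimiter runs unchanged, replacing A's character-by-character state machine, its parallel WORDS/DELIMITERS lists and its text[0]-keyed padded re-interleaving loop.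
-- outside the precondition, e.g. on stringReverseDelimiter(''): A raises IndexError, B returns ''
import Mathlib
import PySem

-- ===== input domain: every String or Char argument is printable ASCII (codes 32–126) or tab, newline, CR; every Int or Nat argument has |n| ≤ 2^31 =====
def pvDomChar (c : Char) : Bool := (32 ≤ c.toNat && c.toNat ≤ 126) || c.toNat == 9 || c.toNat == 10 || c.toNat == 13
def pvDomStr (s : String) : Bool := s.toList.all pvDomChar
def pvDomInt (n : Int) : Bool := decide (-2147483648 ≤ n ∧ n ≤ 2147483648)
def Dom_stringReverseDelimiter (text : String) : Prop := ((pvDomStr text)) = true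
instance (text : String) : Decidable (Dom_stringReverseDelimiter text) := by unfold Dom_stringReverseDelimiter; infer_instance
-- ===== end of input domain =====

-- B reverses the words of a string while keeping the non-letter runs in place, by
-- run tokenisation + in-place substitution instead of A's char-by-char state machine
-- and padded re-interleaving loop (objective: idiomatic).

-- c in string.ascii_letters
def pvIsL (c : Char) : Bool := ('a' ≤ c && c ≤ 'z') || ('A' ≤ c && c ≤ 'Z')

-- x[0] in LETTERS; Python raises IndexError on x = "" — under Pre_ every token is nonempty
def pvHeadIsL (r : List Char) : Bool :=
  match r with
  | [] => false
  | c :: _ => pvIsL c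

-- ===== PORT A =====
-- one iteration of A's tokenising for-loop; TEMP[-1] is the last element (nonempty in those branches)
def pvAStep (st : List (List Char) × List Char) (c : Char) : List (List Char) × List Char :=
  match st with
  | (sep, temp) =>
    if temp.isEmpty then (sep, temp ++ [c])
    else if !pvIsL c && pvIsL (temp.getLastD 'a') then (sep ++ [temp], [c])
    else if pvIsL c && !pvIsL (temp.getLastD 'a') then (sep ++ [temp], [c])
    else (sep, temp ++ [c])

def stringReverseDelimiter (text : String) : String :=
  let l := text.toList
  let st := l.foldl pvAStep ([], [])
  let sep := st.1 ++ [st.2]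
  let words := (sep.filter (fun x => pvHeadIsL x)).reverse
  let delims := sep.filter (fun x => !pvHeadIsL x)
  let count := max words.length delims.length
  let bflag := pvHeadIsL l        -- text[0] in LETTERS; IndexError on "" — excluded by Pre_
  let results := (List.range count).foldl (fun acc i =>
      acc ++ [if bflag then words.getD i [] ++ delims.getD i []
              else delims.getD i [] ++ words.getD i []]) []   -- try/except → getD
  String.ofList (PySem.Chars.strip results.flatten)

-- ===== PORT B =====
-- two-pointer run splitter: peel the maximal run of text[i]'s class, recurse on the rest
def pvRuns : List Char → List (List Char)
  | [] => []
  | c :: rest =>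
    (c :: rest.takeWhile (fun d => pvIsL d == pvIsL c)) ::
      pvRuns (rest.dropWhile (fun d => pvIsL d == pvIsL c))
termination_by l => l.length
decreasing_by
  simp only [List.length_cons]
  exact Nat.lt_succ_of_le (List.length_dropWhile_le _ _)

-- the join generator: next(it) for a letter run, the run itself otherwise
def pvSub : List (List Char) → List (List Char) → List Char
  | [], _ => []
  | r :: rs, ws =>
    if pvHeadIsL r then ws.headD [] ++ pvSub rs ws.tail
    else r ++ pvSub rs ws

def stringReverseDelimiter_alt (text : String) : String :=
  let runs := pvRuns text.toList
  let words := (runs.filter (fun r => pvHeadIsL r)).reverse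
  String.ofList (PySem.Chars.strip (pvSub runs words))

-- ===== PRECONDITION & SPEC =====
-- A raises IndexError on the empty string (x[0] of the empty leftover token); excluded
def Pre_stringReverseDelimiter (text : String) : Prop := text ≠ ""
instance (text : String) : Decidable (Pre_stringReverseDelimiter text) := by
  unfold Pre_stringReverseDelimiter; infer_instance

def pvWitness_stringReverseDelimiter : String := "hello/world:here"

def Spec_stringReverseDelimiter (text : String) (out : String) : Prop := out = stringReverseDelimiter_alt text
instance (text : String) (out : String) : Decidable (Spec_stringReverseDelimiter text out) := by unfold Spec_stringReverseDelimiter; infer_instance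

-- ===== CLAIM (what is proved, stated in full; the proofs are below) =====
def Claim_equal_stringReverseDelimiter : Prop := ∀ (text : String), Dom_stringReverseDelimiter text → Pre_stringReverseDelimiter text → Spec_stringReverseDelimiter text (stringReverseDelimiter text)

-- ===== LEMMAS AND PROOFS =====

-- w0 ++ d0 ++ w1 ++ d1 ++ … (roles swap at each step; the shorter list just runs out)
def pvAltJoin : List (List Char) → List (List Char) → List Char
  | [], ds => ds.flatten
  | w :: ws, ds => w ++ pvAltJoin ds ws
termination_by ws ds => ws.length + ds.length
decreasing_by simp only [List.length_cons]; omega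

-- the runs alternate in class, starting with b
def pvAlt : Bool → List (List Char) → Prop
  | _, [] => True
  | b, r :: rs => pvHeadIsL r = b ∧ pvAlt (!b) rs

theorem pvAltJoin_nil_right (ws : List (List Char)) : pvAltJoin ws [] = ws.flatten := by
  cases ws with
  | nil => simp [pvAltJoin]
  | cons w ws => simp [pvAltJoin]

-- A's padded pairwise interleave, flattened, is the strict alternation pvAltJoin
theorem pvRangeJoin (ws ds : List (List Char)) :
    (List.range (max ws.length ds.length)).flatMap
      (fun i => ws.getD i [] ++ ds.getD i []) = pvAltJoin ws ds := by
  induction ws generalizing ds with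
  | nil =>
    induction ds with
    | nil => simp [pvAltJoin]
    | cons d ds ih =>
      simp only [List.length_nil, List.length_cons, Nat.max_eq_right (Nat.zero_le _)] at *
      rw [List.range_succ_eq_map]
      simp only [List.flatMap_cons, List.flatMap_map]
      simpa [pvAltJoin] using ih
  | cons w ws ih =>
    cases ds with
    | nil =>
      have h := ih ([] : List (List Char))
      simp only [List.length_nil, Nat.max_zero, List.getD_nil, List.append_nil, List.length_cons] at h ⊢
      rw [List.range_succ_eq_map, List.flatMap_cons, List.flatMap_map]
      simp only [List.getD_cons_zero, List.getD_cons_succ]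
      rw [h, pvAltJoin, pvAltJoin_nil_right]
      simp [pvAltJoin]
    | cons d ds =>
      simp only [List.length_cons, Nat.succ_max_succ]
      rw [List.range_succ_eq_map, List.flatMap_cons, List.flatMap_map]
      simp only [List.getD_cons_zero, List.getD_cons_succ]
      rw [ih ds, pvAltJoin, pvAltJoin]
      simp [List.append_assoc]

-- A's tokenising loop, started on a nonempty homogeneous TEMP, produces exactly B's runs
theorem pvFold_runs (l : List Char) : ∀ (sep : List (List Char)) (temp : List Char) (b : Bool),
    temp ≠ [] → (∀ d ∈ temp, pvIsL d = b) →
    (let st := l.foldl pvAStep (sep, temp); st.1 ++ [st.2]) =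
      sep ++ ((temp ++ l.takeWhile (fun d => pvIsL d == b)) ::
        pvRuns (l.dropWhile (fun d => pvIsL d == b))) := by
  induction l with
  | nil => intro sep temp b _ _; simp [pvRuns]
  | cons c l ih =>
    intro sep temp b hne hhom
    have hlastmem : temp.getLastD 'a' ∈ temp := by
      cases temp with
      | nil => exact absurd rfl hne
      | cons t ts => exact List.mem_of_getLast? rfl
    have hlast : pvIsL (temp.getLastD 'a') = b := hhom _ hlastmem
    have hemp : temp.isEmpty = false := by simpa using hne
    by_cases hc : pvIsL c = b
    · have hstep : pvAStep (sep, temp) c = (sep, temp ++ [c]) := by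
        simp only [pvAStep, hemp, hlast, hc]
        cases b <;> simp
      have hhom' : ∀ d ∈ temp ++ [c], pvIsL d = b := by
        intro d hd
        rcases List.mem_append.mp hd with h | h
        · exact hhom d h
        · simp only [List.mem_singleton] at h; subst h; exact hc
      rw [List.foldl_cons, hstep, ih sep (temp ++ [c]) b (by simp) hhom']
      rw [List.takeWhile_cons_of_pos (by simp [hc]), List.dropWhile_cons_of_pos (by simp [hc])]
      simp
    · have hc' : pvIsL c = !b := by cases b <;> simp_all
      have hstep : pvAStep (sep, temp) c = (sep ++ [temp], [c]) := by
        simp only [pvAStep, hemp, hlast, hc']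
        cases b <;> simp
      rw [List.foldl_cons, hstep,
        ih (sep ++ [temp]) [c] (pvIsL c) (by simp) (by intro d hd; simp at hd; subst hd; rfl)]
      rw [List.takeWhile_cons_of_neg (by simp [hc']),
        List.dropWhile_cons_of_neg (by simp [hc'])]
      rw [pvRuns]
      simp
  
theorem pvRuns_alt (c : Char) (l : List Char) : pvAlt (pvIsL c) (pvRuns (c :: l)) := by
  rw [pvRuns]
  refine ⟨rfl, ?_⟩
  cases h : l.dropWhile (fun d => pvIsL d == pvIsL c) with
  | nil => simp [pvRuns, pvAlt]
  | cons d l' =>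
    have hd : (pvIsL d == pvIsL c) = false := by
      have := List.head?_dropWhile_not (fun d => pvIsL d == pvIsL c) l
      rw [h] at this; simpa using this
    have hdc : pvIsL d = !pvIsL c := by
      cases hc : pvIsL c <;> cases hdd : pvIsL d <;> simp_all
    rw [← hdc]
    exact pvRuns_alt d l'
termination_by l.length
decreasing_by
  have hle := List.length_dropWhile_le (fun d => pvIsL d == pvIsL c) l
  rw [h] at hle
  simp only [List.length_cons] at hle
  omega

-- substitution over alternating runs equals the alternating join of words and delimiters
theorem pvSub_eq (runs : List (List Char)) : ∀ (ws : List (List Char)) (b : Bool),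
    pvAlt b runs →
    ws.length = (runs.filter (fun r => pvHeadIsL r)).length →
    pvSub runs ws = if b then pvAltJoin ws (runs.filter (fun r => !pvHeadIsL r))
                    else pvAltJoin (runs.filter (fun r => !pvHeadIsL r)) ws := by
  induction runs with
  | nil =>
    intro ws b _ hlen
    simp only [List.filter_nil, List.length_nil] at hlen
    rw [List.length_eq_zero_iff] at hlen
    subst hlen
    cases b <;> simp [pvSub, pvAltJoin]
  | cons r rs ih =>
    intro ws b halt hlen
    obtain ⟨hr, halt'⟩ := halt
    cases b with
    | true =>
      rw [List.filter_cons_of_pos (by simp [hr])] at hlen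
      simp only [List.length_cons] at hlen
      cases ws with
      | nil => simp at hlen
      | cons w ws' =>
        simp only [List.length_cons] at hlen
        rw [pvSub]
        simp only [hr, if_true, List.headD_cons, List.tail_cons]
        rw [ih ws' false halt' (by omega)]
        rw [List.filter_cons_of_neg (by simp [hr])]
        simp [pvAltJoin]
    | false =>
      rw [List.filter_cons_of_neg (by simp [hr])] at hlen
      rw [pvSub]
      simp only [hr, if_false, Bool.false_eq_true]
      rw [ih ws true halt' hlen]
      rw [List.filter_cons_of_pos (by simp [hr])]
      simp [pvAltJoin]

-- ===== VERDICT (by name: the statement is the Claim_ definition above) =====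
theorem stringReverseDelimiter_spec : Claim_equal_stringReverseDelimiter := by
  intro text _ hpre
  unfold Spec_stringReverseDelimiter stringReverseDelimiter stringReverseDelimiter_alt
  cases htext : text.toList with
  | nil => exact absurd (String.toList_eq_nil_iff.mp htext) hpre
  | cons c l =>
    simp only []
    -- A's tokenisation equals B's runs
    have hsep : (((c :: l).foldl pvAStep ([], [])).1 ++ [((c :: l).foldl pvAStep ([], [])).2]) =
        pvRuns (c :: l) := by
      have h0 : pvAStep ([], []) c = ([], [c]) := by simp [pvAStep]
      rw [List.foldl_cons, h0,
        pvFold_runs l [] [c] (pvIsL c) (by simp) (by intro d hd; simp at hd; subst hd; rfl)]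
      rw [pvRuns]
      simp
    set runs := pvRuns (c :: l) with hruns
    set ws := (runs.filter (fun r => pvHeadIsL r)).reverse with hws
    set ds := runs.filter (fun r => !pvHeadIsL r) with hds
    have halt : pvAlt (pvIsL c) runs := pvRuns_alt c l
    have hlen : ws.length = (runs.filter (fun r => pvHeadIsL r)).length := by simp [hws]
    have hfold : ∀ g : ℕ → List Char, (List.range (max ws.length ds.length)).foldl
        (fun acc i => acc ++ [g i]) [] = (List.range (max ws.length ds.length)).map g :=
      fun g => PySem.List.foldl_append_singleton_eq_map g _ []
    congr 1
    rw [hsep]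
    have hbflag : pvHeadIsL (c :: l) = pvIsL c := rfl
    rw [hbflag]
    cases hc : pvIsL c with
    | true =>
      simp only [if_true]
      rw [hfold, ← List.flatMap_def, pvRangeJoin ws ds,
        pvSub_eq runs ws true (hc ▸ halt) hlen, ← hds]
      simp
    | false =>
      simp only [Bool.false_eq_true, if_false]
      simp only [← hws, ← hds]
      rw [hfold, ← List.flatMap_def, Nat.max_comm, pvRangeJoin ds ws,
        pvSub_eq runs ws false (hc ▸ halt) hlen, ← hds]
      simp
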